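-- pv_equiv track=rewrite | github.com/ferraroroberto/vibe-coding-workshop | scripts/sync_slideshow_to_starters.py | extract_content_from_template_literal
-- ===== SOURCE A (Python) =====
-- def extract_content_from_template_literal(js_content: str, start_marker: str) -> str:
--     """Extract content from a JavaScript template literal (backtick string)."""
--     # Find content: `...` - need to handle nested backticks (escaped as \`)
--     idx = js_content.find(start_marker)
--     if idx == -1:
--         return ""
--     # Find opening backtick after content: `
--     backtick_start = js_content.find("`", idx)
--     if backtick_start == -1:
--         return ""
--     # Parse until we find unescaped closing backtick
--     result = []
--     i = backtick_start + 1
--     while i < len(js_content):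
--         if js_content[i] == "\\" and i + 1 < len(js_content):
--             # Escaped char - in our case \` becomes `
--             if js_content[i + 1] == "`":
--                 result.append("`")
--                 i += 2
--                 continue
--             result.append(js_content[i])
--             result.append(js_content[i + 1])
--             i += 2
--             continue
--         if js_content[i] == "`":
--             break
--         result.append(js_content[i])
--         i += 1
--     return "".join(result)
-- ===== SOURCE B (Python) =====
-- def extract_content_from_template_literal(js_content: str, start_marker: str) -> str:
--     """Extract content from a JavaScript template literal (backtick string)."""
--     idx = js_content.find(start_marker)
--     if idx == -1:
--         return ""
--     backtick_start = js_content.find("`", idx)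
--     if backtick_start == -1:
--         return ""
--     rest = js_content[backtick_start + 1:]
--     # Find the closing backtick: the first backtick preceded by an EVEN number
--     # of consecutive backslashes (an odd run would escape it).
--     end = len(rest)
--     pos = 0
--     while True:
--         j = rest.find("`", pos)
--         if j == -1:
--             break
--         k = j
--         while k > 0 and rest[k - 1] == "\\":
--             k -= 1
--         if (j - k) % 2 == 0:
--             end = j
--             break
--         pos = j + 1
--     # Convert \` to ` and leave every other escape (and a trailing lone \) as is.
--     return rest[:end].replace("\\`", "`")
-- ===== Notes on version B (the rewrite author's own statement) =====
-- stated objective: alternative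
-- what changed: Instead of A's stateful char-by-char loop that appends to a result list while decoding escapes inline, B locates the closing backtick by jumping between backtick occurrences with str.find and testing the parity of the run of backslashes before each, then slices the raw content and converts escaped backticks with one str.replace('\\`', '`').
import Mathlib
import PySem

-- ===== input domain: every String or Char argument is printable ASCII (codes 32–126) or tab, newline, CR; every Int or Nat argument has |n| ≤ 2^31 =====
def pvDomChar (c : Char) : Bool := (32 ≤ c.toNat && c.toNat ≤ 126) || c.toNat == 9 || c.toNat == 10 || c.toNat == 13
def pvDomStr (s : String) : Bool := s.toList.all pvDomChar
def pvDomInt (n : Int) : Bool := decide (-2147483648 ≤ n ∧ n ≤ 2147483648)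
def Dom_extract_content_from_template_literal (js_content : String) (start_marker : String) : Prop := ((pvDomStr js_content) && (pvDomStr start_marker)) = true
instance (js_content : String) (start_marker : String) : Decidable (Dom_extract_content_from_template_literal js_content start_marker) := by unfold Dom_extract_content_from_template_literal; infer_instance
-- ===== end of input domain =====

-- B locates the closing backtick by jumping between backtick occurrences and testing the
-- parity of the backslash run before each, then decodes \` with one str.replace;
-- A decodes escapes inline in a char-by-char accumulator loop.  Objective: alternative.

-- ===== PORT A =====
-- the 'while i < len(js_content)' loop of A, as structural recursion on the chars from i on
def pvScan : List Char → List Char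
  | [] => []
  | c :: rest =>
    if c = '\\' then
      match rest with
      | c2 :: rest2 => if c2 = '`' then '`' :: pvScan rest2 else c :: c2 :: pvScan rest2
      | [] => [c]
    else if c = '`' then []
    else c :: pvScan rest

def extract_content_from_template_literal (js_content : String) (start_marker : String) : String :=
  let idx := PySem.Str.find js_content start_marker
  if idx = -1 then ""
  else
    let backtick_start := PySem.Str.findFrom js_content "`" idx
    if backtick_start = -1 then ""
    else String.ofList (pvScan (js_content.toList.drop (backtick_start.toNat + 1)))

-- ===== PORT B =====
-- facts about findFrom needed by pvFindEnd's termination (and reused in the proofs below)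
theorem pvFindFrom_of_len_lt (r : List Char) (pos : Nat) (h : r.length < pos) :
    PySem.Chars.findFrom r ['`'] (pos : Int) none = -1 := by
  simp only [PySem.Chars.findFrom]
  rw [if_neg (show ¬((pos:Int) < 0) by omega)]
  rw [if_pos (show ((r.length:Int) : Int) < (pos:Int) by exact_mod_cast h)]

theorem pvSingPrefix (l : List Char) (c : Char) : [c] <+: l ↔ l.head? = some c := by
  cases l with
  | nil => simp
  | cons x xs => simp [List.cons_prefix_cons, eq_comm]

theorem pvFindProps (r : List Char) (pos : Nat)
    (h : PySem.Chars.findFrom r ['`'] (pos : Int) none ≠ -1) :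
    pos ≤ r.length ∧ 0 ≤ PySem.Chars.findFrom r ['`'] (pos : Int) none ∧
    pos ≤ (PySem.Chars.findFrom r ['`'] (pos : Int) none).toNat ∧
    (PySem.Chars.findFrom r ['`'] (pos : Int) none).toNat < r.length ∧
    r[(PySem.Chars.findFrom r ['`'] (pos : Int) none).toNat]? = some '`' ∧
    ∀ i, pos ≤ i → i < (PySem.Chars.findFrom r ['`'] (pos : Int) none).toNat → r[i]? ≠ some '`' := by
  have hlen : pos ≤ r.length := by
    by_contra hc
    exact h (pvFindFrom_of_len_lt r pos (by omega))
  obtain ⟨hle, hpre, hmin⟩ := PySem.Chars.findFrom_natCast_spec r ['`'] pos hlen h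
  have hget : r[(PySem.Chars.findFrom r ['`'] (pos : Int) none).toNat]? = some '`' := by
    rw [← List.head?_drop]
    exact (pvSingPrefix _ '`').mp hpre
  refine ⟨hlen, by omega, by omega, ?_, hget, ?_⟩
  · exact (List.getElem?_eq_some_iff.mp hget).1
  · intro i h1 h2 hgi
    exact hmin i h1 h2 ((pvSingPrefix _ '`').mpr (by rw [List.head?_drop]; exact hgi))

-- the inner 'while k > 0 and rest[k-1] == "\\"' loop of B
def pvBackCnt (r : List Char) : Nat → Nat
  | 0 => 0
  | k + 1 => if PySem.List.pyGet? r ((k : Int) + 1 - 1) = some '\\' then pvBackCnt r k else k + 1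

-- the outer 'while True' loop of B: first backtick at ≥ pos preceded by an even backslash run
def pvFindEnd (r : List Char) (pos : Nat) : Nat :=
  let j := PySem.Chars.findFrom r ['`'] (pos : Int) none
  if hj : j = -1 then r.length
  else
    let k := pvBackCnt r j.toNat
    if PySem.Int.mod (j - (k : Int)) 2 = 0 then j.toNat
    else pvFindEnd r (j.toNat + 1)
termination_by r.length - pos
decreasing_by
  have hp := pvFindProps r pos hj
  omega

def extract_content_from_template_literal_alt (js_content : String) (start_marker : String) : String :=
  let idx := PySem.Str.find js_content start_marker
  if idx = -1 then ""
  else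
    let backtick_start := PySem.Str.findFrom js_content "`" idx
    if backtick_start = -1 then ""
    else
      let rest := PySem.Chars.slice js_content.toList (some (backtick_start + 1)) none
      let e := pvFindEnd rest 0
      String.ofList (PySem.Chars.replace (PySem.Chars.slice rest none (some (e : Int))) ['\\', '`'] ['`'])

-- ===== PRECONDITION & SPEC =====
def Spec_extract_content_from_template_literal (js_content : String) (start_marker : String) (out : String) : Prop := out = extract_content_from_template_literal_alt js_content start_marker
instance (js_content : String) (start_marker : String) (out : String) : Decidable (Spec_extract_content_from_template_literal js_content start_marker out) := by unfold Spec_extract_content_from_template_literal; infer_instance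

-- ===== CLAIM (what is proved, stated in full; the proofs are below) =====
def Claim_equal_extract_content_from_template_literal : Prop := ∀ (js_content : String) (start_marker : String), Dom_extract_content_from_template_literal js_content start_marker → Spec_extract_content_from_template_literal js_content start_marker (extract_content_from_template_literal js_content start_marker)

-- ===== LEMMAS AND PROOFS =====

-- clean recursion computing Chars.replace · ['\\','`'] ['`']
def pvRepl : List Char → List Char
  | [] => []
  | [c] => [c]
  | c1 :: c2 :: t => if c1 = '\\' ∧ c2 = '`' then '`' :: pvRepl t else c1 :: pvRepl (c2 :: t)

theorem pvGo (fuel : Nat) : ∀ (l acc : List Char), l.length ≤ fuel →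
    PySem.Chars.replace.go ['\\','`'] ['`'] fuel l acc = acc.reverse ++ pvRepl l := by
  induction fuel with
  | zero =>
    intro l acc h
    have hl : l = [] := by cases l <;> simp_all
    subst hl
    simp [PySem.Chars.replace.go, pvRepl]
  | succ n ih =>
    intro l acc h
    match l with
    | [] => simp [PySem.Chars.replace.go, pvRepl]
    | [c] =>
      have hpre : (['\\','`'] : List Char).isPrefixOf [c] = false := by
        simp [List.isPrefixOf]
      simp only [PySem.Chars.replace.go, hpre, Bool.false_eq_true, if_false]
      rw [ih [] (c :: acc) (by simp)]
      simp [pvRepl]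
    | c1 :: c2 :: t =>
      by_cases hp : c1 = '\\' ∧ c2 = '`'
      · have hpre : (['\\','`'] : List Char).isPrefixOf (c1 :: c2 :: t) = true := by
          simp [List.isPrefixOf, hp.1, hp.2]
        simp only [PySem.Chars.replace.go, hpre, if_true]
        rw [show List.drop (['\\','`'] : List Char).length (c1 :: c2 :: t) = t by simp]
        rw [ih t (('`' :: List.nil).reverse ++ acc) (by simp at h ⊢; omega)]
        simp [pvRepl, hp]
      · have hpre : (['\\','`'] : List Char).isPrefixOf (c1 :: c2 :: t) = false := by
          simp [List.isPrefixOf]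
          intro h1 h2
          exact hp ⟨h1.symm, h2.symm⟩
        simp only [PySem.Chars.replace.go, hpre, Bool.false_eq_true, if_false]
        rw [ih (c2 :: t) (c1 :: acc) (by simp at h ⊢; omega)]
        simp [pvRepl, hp]

theorem pvReplace_eq (l : List Char) :
    PySem.Chars.replace l ['\\', '`'] ['`'] = pvRepl l := by
  rw [PySem.Chars.replace]
  simp only [List.isEmpty_cons, Bool.false_eq_true, if_false]
  rw [pvGo l.length l [] (le_refl _)]
  simp

-- length of the trailing backslash run
def pvTrail : List Char → Nat
  | [] => 0
  | c :: l => if c = '\\' ∧ pvTrail l = l.length then l.length + 1 else pvTrail l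

-- "position j is an unescaped closing backtick"
def pvP (r : List Char) (j : Nat) : Prop := r[j]? = some '`' ∧ pvTrail (r.take j) % 2 = 0

-- index of the first unescaped backtick (or length), by A's forward scan
def pvSEnd : List Char → Nat
  | [] => 0
  | c :: rest =>
    if c = '\\' then
      match rest with
      | _ :: rest2 => 2 + pvSEnd rest2
      | [] => 1
    else if c = '`' then 0
    else 1 + pvSEnd rest

theorem pvTrail_le (l : List Char) : pvTrail l ≤ l.length := by
  induction l with
  | nil => simp [pvTrail]
  | cons c l ih => simp only [pvTrail, List.length_cons]; split <;> omega

theorem pvTrail_cons_ne {c : Char} (hc : c ≠ '\\') (m : List Char) :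
    pvTrail (c :: m) = pvTrail m := by
  simp [pvTrail, hc]

theorem pvTrail_parity2 (c : Char) (m : List Char) :
    pvTrail ('\\' :: c :: m) % 2 = pvTrail m % 2 := by
  have h1 := pvTrail_le m
  simp only [pvTrail, List.length_cons]
  split <;> split <;> simp_all <;> try omega

theorem pvTrail_append_singleton (l : List Char) (c : Char) :
    pvTrail (l ++ [c]) = if c = '\\' then pvTrail l + 1 else 0 := by
  induction l with
  | nil => simp [pvTrail]
  | cons x l ih =>
    have h1 := pvTrail_le l
    simp only [List.cons_append, pvTrail, ih, List.length_append, List.length_cons,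
      List.length_nil]
    by_cases hc : c = '\\' <;> simp [hc] <;> (try split) <;> simp_all

theorem pvSEnd_esc (c2 : Char) (rest2 : List Char) :
    pvSEnd ('\\' :: c2 :: rest2) = (pvSEnd rest2 + 1) + 1 := by
  conv_lhs => unfold pvSEnd
  rw [if_pos rfl]
  show 2 + pvSEnd rest2 = pvSEnd rest2 + 1 + 1
  omega

theorem pvSEnd_tick (rest : List Char) : pvSEnd ('`' :: rest) = 0 := by
  conv_lhs => unfold pvSEnd
  rw [if_neg (by decide), if_pos rfl]

theorem pvSEnd_other {c : Char} (hc : c ≠ '\\') (hg : c ≠ '`') (rest : List Char) :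
    pvSEnd (c :: rest) = pvSEnd rest + 1 := by
  conv_lhs => unfold pvSEnd
  rw [if_neg hc, if_neg hg]
  show 1 + pvSEnd rest = pvSEnd rest + 1
  omega

theorem pvSEnd_bs : pvSEnd ['\\'] = 1 := by rfl

theorem pvHead_take_sEnd (l : List Char) : (l.take (pvSEnd l)).head? ≠ some '`' := by
  cases l with
  | nil => simp
  | cons c rest =>
    by_cases hc : c = '\\'
    · subst hc
      cases rest with
      | nil => rw [pvSEnd_bs]; simp
      | cons c2 rest2 => rw [pvSEnd_esc, List.take_succ_cons]; simp
    · by_cases hg : c = '`'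
      · subst hg; rw [pvSEnd_tick]; simp
      · rw [pvSEnd_other hc hg, List.take_succ_cons, List.head?_cons]
        simpa using hg

theorem pvScan_eq (r : List Char) : pvScan r = pvRepl (r.take (pvSEnd r)) := by
  fun_induction pvScan r with
  | case1 => simp [pvSEnd, pvRepl]
  | case2 rest2 ih =>
    rw [pvSEnd_esc, List.take_succ_cons, List.take_succ_cons, ih]
    simp [pvRepl]
  | case3 c2 rest2 hc2 ih =>
    rw [pvSEnd_esc, List.take_succ_cons, List.take_succ_cons, ih]
    have hh := pvHead_take_sEnd rest2
    cases htk : (rest2.take (pvSEnd rest2)) with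
    | nil => simp [pvRepl, hc2]
    | cons x xs =>
      rw [htk] at hh
      simp only [pvRepl]
      rw [if_neg (by simp [hc2]), if_neg (by rintro ⟨h1, h2⟩; subst h2; simp at hh)]
  | case4 => rw [pvSEnd_bs]; simp [pvRepl]
  | case5 rest h => rw [pvSEnd_tick]; simp [pvRepl]
  | case6 c rest hc hg ih =>
    rw [pvSEnd_other hc hg, List.take_succ_cons, ih]
    have hh := pvHead_take_sEnd rest
    cases htk : (rest.take (pvSEnd rest)) with
    | nil => simp [pvRepl]
    | cons x xs =>
      rw [htk] at hh
      simp only [pvRepl]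
      rw [if_neg]
      rintro ⟨h1, h2⟩; subst h2; simp at hh

-- absolute-position shift lemmas for pvP
theorem pvP_shift2 (c2 : Char) (rest2 : List Char) (j : Nat) :
    pvP ('\\' :: c2 :: rest2) (j + 2) ↔ pvP rest2 j := by
  unfold pvP
  rw [show j + 2 = (j+1)+1 from rfl, List.getElem?_cons_succ, List.getElem?_cons_succ,
    List.take_succ_cons, List.take_succ_cons, pvTrail_parity2]

theorem pvP_shift1 {c : Char} (hc : c ≠ '\\') (rest : List Char) (j : Nat) :
    pvP (c :: rest) (j + 1) ↔ pvP rest j := by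
  unfold pvP
  rw [List.getElem?_cons_succ, List.take_succ_cons, pvTrail_cons_ne hc]

-- pvSEnd finds exactly the least pvP position (or length)
theorem pvSEnd_spec (r : List Char) :
    (∀ j < pvSEnd r, ¬ pvP r j) ∧ pvSEnd r ≤ r.length ∧
    (pvSEnd r < r.length → pvP r (pvSEnd r)) := by
  fun_induction pvSEnd r with
  | case1 => exact ⟨by omega, by simp, by simp⟩
  | case2 c2 rest2 ih =>
    obtain ⟨ih1, ih2, ih3⟩ := ih
    refine ⟨?_, by simpa using by omega, ?_⟩
    · intro j hj
      match j with
      | 0 => simp [pvP]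
      | 1 =>
        rintro ⟨hg, hpar⟩
        simp at hg
        subst hg
        simp [List.take_succ_cons, pvTrail] at hpar
      | (j+2) =>
        rw [pvP_shift2]
        exact ih1 j (by omega)
    · intro hlt
      rw [show 2 + pvSEnd rest2 = pvSEnd rest2 + 2 from by omega, pvP_shift2]
      exact ih3 (by simp at hlt; omega)
  | case3 =>
    refine ⟨?_, by simp, by simp⟩
    intro j hj
    match j with
    | 0 => simp [pvP]
  | case4 rest h =>
    refine ⟨by omega, by simp, ?_⟩
    intro _
    exact ⟨by simp, by simp [pvTrail]⟩
  | case5 c rest hc hg ih =>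
    obtain ⟨ih1, ih2, ih3⟩ := ih
    refine ⟨?_, by simpa using by omega, ?_⟩
    · intro j hj
      match j with
      | 0 => rintro hp0; exact hg (by simpa using hp0.1)
      | (j+1) =>
        rw [pvP_shift1 hc]
        exact ih1 j (by omega)
    · intro hlt
      rw [show 1 + pvSEnd rest = pvSEnd rest + 1 from by omega, pvP_shift1 hc]
      exact ih3 (by simp at hlt; omega)

theorem pvBackCnt_eq (r : List Char) (j : Nat) (hj : j ≤ r.length) :
    pvBackCnt r j = j - pvTrail (r.take j) ∧ pvTrail (r.take j) ≤ j := by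
  induction j with
  | zero => simp [pvBackCnt, pvTrail]
  | succ k ih =>
    have hk : k < r.length := by omega
    obtain ⟨ih1, ih2⟩ := ih (by omega)
    have hget : PySem.List.pyGet? r ((k : Int) + 1 - 1) = r[k]? := by
      rw [show ((k:Int) + 1 - 1) = (k:Int) by ring]
      exact PySem.List.pyGet?_natCast r k
    have htake : r.take (k+1) = r.take k ++ [r[k]] := by
      rw [List.take_add_one, List.getElem?_eq_getElem hk]
      rfl
    simp only [pvBackCnt, hget, htake, pvTrail_append_singleton]
    by_cases hc : r[k] = '\\'
    · rw [if_pos (by rw [List.getElem?_eq_getElem hk, hc]), if_pos hc, ih1]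
      omega
    · rw [if_neg (by rw [List.getElem?_eq_getElem hk]; simpa using hc), if_neg hc]
      omega

-- if there is no backtick at any position ≥ pos and no pvP position < pos, the scan runs to the end
theorem pvNoTick (r : List Char) (pos : Nat) (hpos : pos ≤ r.length)
    (hff : PySem.Chars.findFrom r ['`'] (pos : Int) none = -1)
    (hmin : ∀ i < pos, ¬ pvP r i) : pvSEnd r = r.length := by
  obtain ⟨s1, s2, s3⟩ := pvSEnd_spec r
  by_contra hne
  have hlt : pvSEnd r < r.length := by omega
  have hP := s3 hlt
  have hnotin := (PySem.Chars.findFrom_natCast_eq_neg_one_iff r ['`'] pos hpos).mp hff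
  rcases Nat.lt_or_ge (pvSEnd r) pos with h | h
  · exact hmin _ h hP
  · apply hnotin
    rw [List.singleton_infix_iff]
    have : (r.drop pos)[pvSEnd r - pos]? = some '`' := by
      rw [List.getElem?_drop, show pos + (pvSEnd r - pos) = pvSEnd r from by omega]
      exact hP.1
    exact List.mem_of_getElem? this

-- B's outer loop computes the same cut position as A's forward scan
theorem pvFindEnd_eq (r : List Char) (n : Nat) : ∀ (pos : Nat), r.length - pos ≤ n →
    pos ≤ r.length → (∀ i < pos, ¬ pvP r i) → pvFindEnd r pos = pvSEnd r := by
  induction n with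
  | zero =>
    intro pos hn hpos hmin
    have hj : PySem.Chars.findFrom r ['`'] (pos : Int) none = -1 := by
      by_contra hj
      have hp := pvFindProps r pos hj
      omega
    rw [pvFindEnd, dif_pos hj]
    exact (pvNoTick r pos hpos hj hmin).symm
  | succ n ih =>
    intro pos hn hpos hmin
    by_cases hj : PySem.Chars.findFrom r ['`'] (pos : Int) none = -1
    · rw [pvFindEnd, dif_pos hj]
      exact (pvNoTick r pos hpos hj hmin).symm
    · obtain ⟨_, hj0, hjge, hjlt, hjget, hjmin⟩ := pvFindProps r pos hj
      set j := PySem.Chars.findFrom r ['`'] (pos : Int) none with hjdef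
      obtain ⟨hk, hkle⟩ := pvBackCnt_eq r j.toNat (by omega)
      have hparity : (PySem.Int.mod (j - (pvBackCnt r j.toNat : Int)) 2 = 0) ↔
          (pvTrail (r.take j.toNat) % 2 = 0) := by
        rw [PySem.Int.mod_eq_emod_of_pos (by omega), hk]
        omega
      have hnP : ∀ i < j.toNat, ¬ pvP r i := by
        intro i hi
        rcases Nat.lt_or_ge i pos with h | h
        · exact hmin i h
        · intro hp; exact hjmin i h hi hp.1
      rw [pvFindEnd, dif_neg hj]
      by_cases hpar : PySem.Int.mod (j - (pvBackCnt r j.toNat : Int)) 2 = 0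
      · rw [if_pos hpar]
        have hPt : pvP r j.toNat := ⟨hjget, hparity.mp hpar⟩
        obtain ⟨s1, s2, s3⟩ := pvSEnd_spec r
        rcases Nat.lt_trichotomy (pvSEnd r) j.toNat with h | h | h
        · exact absurd (s3 (by omega)) (hnP _ h)
        · omega
        · exact absurd hPt (s1 _ h)
      · rw [if_neg hpar]
        apply ih (j.toNat + 1) (by omega) (by omega)
        intro i hi
        rcases Nat.lt_or_ge i j.toNat with h | h
        · exact hnP i h
        · have : i = j.toNat := by omega
          subst this
          intro hp
          exact hpar (hparity.mpr hp.2)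

-- ===== VERDICT (by name: the statement is the Claim_ definition above) =====
theorem extract_content_from_template_literal_spec : Claim_equal_extract_content_from_template_literal := by
  intro js m _dom
  unfold Spec_extract_content_from_template_literal
  unfold extract_content_from_template_literal extract_content_from_template_literal_alt
  simp only [PySem.Str.find, PySem.Str.findFrom]
  by_cases h1 : PySem.Chars.find js.toList m.toList = -1
  · simp [h1]
  · rw [if_neg h1, if_neg h1]
    have htl : ("`" : String).toList = ['`'] := rfl
    rw [htl]
    have hidx0 : 0 ≤ PySem.Chars.find js.toList m.toList := by
      have := PySem.Chars.neg_one_le_find js.toList m.toList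
      omega
    rw [show PySem.Chars.find js.toList m.toList =
        (((PySem.Chars.find js.toList m.toList).toNat : Nat) : Int) from by omega]
    by_cases h2 : PySem.Chars.findFrom js.toList ['`']
        (((PySem.Chars.find js.toList m.toList).toNat : Nat) : Int) none = -1
    · rw [if_pos h2, if_pos h2]
    · rw [if_neg h2, if_neg h2]
      obtain ⟨-, hbt0, -, -, -, -⟩ :=
        pvFindProps js.toList (PySem.Chars.find js.toList m.toList).toNat h2
      set bt := PySem.Chars.findFrom js.toList ['`']
        (((PySem.Chars.find js.toList m.toList).toNat : Nat) : Int) none with hbtdef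
      have hrest : PySem.Chars.slice js.toList (some (bt + 1)) none
          = js.toList.drop (bt.toNat + 1) := by
        rw [PySem.Chars.slice_eq_listSlice, PySem.List.slice_from js.toList (a := bt + 1) (by omega),
          show (bt + 1).toNat = bt.toNat + 1 from by omega]
      rw [hrest]
      set r := js.toList.drop (bt.toNat + 1) with hrdef
      have hslice2 : PySem.Chars.slice r none (some ((pvFindEnd r 0 : Nat) : Int))
          = r.take (pvFindEnd r 0) := by
        rw [PySem.Chars.slice_eq_listSlice, PySem.List.slice_to_natCast]
      rw [hslice2]
      have hend : pvFindEnd r 0 = pvSEnd r :=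
        pvFindEnd_eq r r.length 0 (by omega) (by omega) (fun i hi => absurd hi (Nat.not_lt_zero i))
      rw [hend, pvReplace_eq, pvScan_eq]
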